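-- pv_equiv track=rewrite | github.com/dkqjrm/codetree-TILs | 240326/흥미로운 숫자 2/interesting-numbers-2.py | check
-- ===== SOURCE A (Python) =====
-- def check(num):
--     num = str(num)
--     num_cnt = {}
--     for i in num:
--         if i not in num_cnt:
--             num_cnt[i] = 1
--         else:
--             num_cnt[i] += 1
--
--     if min(num_cnt.values()) == 1 and max(num_cnt.values()) == (len(num) - 1):
--         return True
--     else:
--         return False
-- ===== SOURCE B (Python) =====
-- def check(num):
--     s = sorted(str(num))
--     counts = []
--     run = 1
--     for prev, cur in zip(s, s[1:]):
--         if cur == prev: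
--             run += 1
--         else:
--             counts.append(run)
--             run = 1
--     counts.append(run)
--     return min(counts) == 1 and max(counts) == len(s) - 1
-- ===== Notes on version B (the rewrite author's own statement) =====
-- stated objective: alternative
-- what changed: B sorts the characters of str(num) and walks the sorted sequence once, accumulating run lengths into a counts list, instead of building a frequency dict and taking min/max of its values.
import Mathlib
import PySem

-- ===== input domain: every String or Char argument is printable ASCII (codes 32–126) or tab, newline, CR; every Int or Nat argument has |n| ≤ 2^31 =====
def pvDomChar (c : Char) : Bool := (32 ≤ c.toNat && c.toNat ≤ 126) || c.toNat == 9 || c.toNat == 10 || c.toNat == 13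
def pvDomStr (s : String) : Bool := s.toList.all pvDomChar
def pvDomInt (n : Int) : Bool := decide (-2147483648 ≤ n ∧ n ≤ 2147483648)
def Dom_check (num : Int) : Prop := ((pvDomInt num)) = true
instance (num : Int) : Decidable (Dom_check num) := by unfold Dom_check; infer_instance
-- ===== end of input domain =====

-- B replaces A's frequency-dict pass by sorting the characters and grouping equal runs; same result, not faster (alternative).

-- ===== PORT A =====
def check (num : Int) : Bool :=
  let s := PySem.Int.toStr num
  let numCnt := s.toList.foldl
    (fun (d : PySem.Dict Char Int) i =>
      if !(d.contains i) then d.insert i 1 else d.insert i (d.getD i 0 + 1))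
    PySem.Dict.empty
  match PySem.List.min? numCnt.values (fun v => v), PySem.List.max? numCnt.values (fun v => v) with
  | some mn, some mx => if mn == 1 && mx == (PySem.Str.len s - 1) then true else false
  | _, _ => false  -- unreachable: str(num) is never empty (min/max of an empty dict would raise)

-- ===== PORT B =====
def check_alt (num : Int) : Bool :=
  let s := PySem.List.sorted (PySem.Int.toStr num).toList (fun c => c) false
  let st := (s.zip (s.drop 1)).foldl
    (fun (st : List Int × Int) pc =>
      if pc.2 == pc.1 then (st.1, st.2 + 1) else (st.1 ++ [st.2], 1))
    (([] : List Int), 1)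
  let counts := st.1 ++ [st.2]
  -- counts ends with the final run, so it is never empty and min?/max? always return a value
  (PySem.List.min? counts (fun v => v)).elim false (fun mn =>
    (PySem.List.max? counts (fun v => v)).elim false (fun mx =>
      mn == 1 && mx == ((s.length : Int) - 1)))

-- ===== PRECONDITION & SPEC =====
def Spec_check (num : Int) (out : Bool) : Prop := out = check_alt num
instance (num : Int) (out : Bool) : Decidable (Spec_check num out) := by unfold Spec_check; infer_instance

-- ===== CLAIM (what is proved, stated in full; the proofs are below) =====
def Claim_equal_check : Prop := ∀ (num : Int), Dom_check num → Spec_check num (check num)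

-- ===== LEMMAS AND PROOFS =====

-- recursive view of B's run-length loop
def pvGo (xs : List Char) (x : Char) (run : Int) : List Int :=
  match xs with
  | [] => [run]
  | y :: ys => if y = x then pvGo ys x (run + 1) else run :: pvGo ys y 1

theorem pvFold_eq_go (xs : List Char) (x : Char) (acc : List Int) (run : Int) :
    (((x :: xs).zip xs).foldl
        (fun (st : List Int × Int) pc =>
          if pc.2 == pc.1 then (st.1, st.2 + 1) else (st.1 ++ [st.2], 1))
        (acc, run)).1 ++
      [(((x :: xs).zip xs).foldl
        (fun (st : List Int × Int) pc =>
          if pc.2 == pc.1 then (st.1, st.2 + 1) else (st.1 ++ [st.2], 1))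
        (acc, run)).2] = acc ++ pvGo xs x run := by
  induction xs generalizing x acc run with
  | nil => simp [pvGo]
  | cons y ys ih =>
    simp only [beq_iff_eq] at ih
    simp only [List.zip_cons_cons, List.foldl_cons, beq_iff_eq]
    by_cases h : y = x
    · rw [pvGo, if_pos h, if_pos h, h]
      exact ih x acc (run + 1)
    · rw [pvGo, if_neg h, if_neg h]
      rw [ih y (acc ++ [run]) 1, List.append_assoc]
      rfl

theorem pvGo_sorted (xs : List Char) (x : Char) (run : Int)
    (h : (x :: xs).Pairwise (· ≤ ·)) :
    pvGo xs x run = (PySem.Set.ofList (x :: xs)).map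
      (fun c => if c = x then run + (xs.count x : Int) else ((x :: xs).count c : Int)) := by
  induction xs generalizing x run with
  | nil => simp [pvGo, PySem.Set.ofList_cons, PySem.Set.ofList_nil, PySem.Set.discard]
  | cons y ys ih =>
    by_cases hyx : y = x
    · subst hyx
      have h' : (y :: ys).Pairwise (· ≤ ·) := (List.pairwise_cons.1 h).2
      have heq : PySem.Set.ofList (y :: y :: ys) = PySem.Set.ofList (y :: ys) := by
        simp [PySem.Set.ofList_cons, PySem.Set.discard, List.filter_filter]
      rw [pvGo, if_pos rfl, ih y (run + 1) h', heq]
      apply List.map_congr_left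
      intro c _
      by_cases hc : c = y
      · subst hc; simp only [List.count_cons_self]; push_cast; ring
      · have hyc : y ≠ c := Ne.symm hc
        simp [hc, hyc]
    · have hx_le : ∀ a ∈ y :: ys, x ≤ a := (List.pairwise_cons.1 h).1
      have h' : (y :: ys).Pairwise (· ≤ ·) := (List.pairwise_cons.1 h).2
      have hxnot : x ∉ y :: ys := by
        intro hmem
        rcases List.mem_cons.1 hmem with h1 | hmem'
        · exact hyx h1.symm
        · have hle1 : x ≤ y := hx_le y (by simp)
          have hle2 : y ≤ x := (List.pairwise_cons.1 h').1 x hmem'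
          exact hyx (le_antisymm hle2 hle1)
      have heq : PySem.Set.ofList (x :: y :: ys) = x :: PySem.Set.ofList (y :: ys) := by
        rw [PySem.Set.ofList_cons]
        congr 1
        refine List.filter_eq_self.2 ?_
        intro a ha
        have ham : a ∈ y :: ys := (PySem.Set.mem_ofList _ _).1 ha
        have : a ≠ x := fun hax => hxnot (hax ▸ ham)
        simpa using this
      have hcx : (y :: ys).count x = 0 := List.count_eq_zero.2 hxnot
      rw [pvGo, if_neg hyx, heq, List.map_cons]
      congr 1
      · simp [hcx]
      · rw [ih y 1 h']
        apply List.map_congr_left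
        intro c hcmem
        have hcm : c ∈ y :: ys := (PySem.Set.mem_ofList _ _).1 hcmem
        have hcnex : c ≠ x := fun hax => hxnot (hax ▸ hcm)
        by_cases hcy : c = y
        · subst hcy
          have hxc : x ≠ c := Ne.symm hcnex
          simp [hcnex, hxc]
          push_cast; ring
        · have hxc : x ≠ c := Ne.symm hcnex
          have hyc : y ≠ c := Ne.symm hcy
          simp [hcy, hcnex, hxc, hyc]

-- A's loop is exactly Counter
theorem pvAFold_eq_counter (l : List Char) :
    l.foldl
      (fun (d : PySem.Dict Char Int) i =>
        if !(d.contains i) then d.insert i 1 else d.insert i (d.getD i 0 + 1))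
      PySem.Dict.empty = PySem.Dict.counter l := by
  have hf : (fun (d : PySem.Dict Char Int) i =>
        if !(d.contains i) then d.insert i 1 else d.insert i (d.getD i 0 + 1))
      = (fun (d : PySem.Dict Char Int) i => d.insert i (d.getD i 0 + 1)) := by
    funext d i
    by_cases h : d.contains i
    · simp [h]
    · have h0 : d.getD i 0 = 0 := PySem.Dict.getD_of_not_contains d 0 (by simpa using h)
      simp [h, h0]
  rw [hf, PySem.Dict.foldl_insert_getD_add_one_eq_counter]

theorem pvMinEq {l l' : List Int} (h : l.Perm l') {m m' : Int}
    (h1 : PySem.List.min? l (fun v => v) = some m)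
    (h2 : PySem.List.min? l' (fun v => v) = some m') : m = m' := by
  have hm := PySem.List.min?_isMin h1
  have hm' := PySem.List.min?_isMin h2
  exact le_antisymm (hm m' (h.mem_iff.2 (PySem.List.min?_mem h2)))
    (hm' m (h.mem_iff.1 (PySem.List.min?_mem h1)))

theorem pvMaxEq {l l' : List Int} (h : l.Perm l') {m m' : Int}
    (h1 : PySem.List.max? l (fun v => v) = some m)
    (h2 : PySem.List.max? l' (fun v => v) = some m') : m = m' := by
  have hm := PySem.List.max?_isMax h1
  have hm' := PySem.List.max?_isMax h2
  exact le_antisymm (hm' m (h.mem_iff.1 (PySem.List.max?_mem h1)))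
    (hm m' (h.mem_iff.2 (PySem.List.max?_mem h2)))

theorem pvAvals_eq (s : List Char) :
    (s.foldl (fun (d : PySem.Dict Char Int) i =>
        if !(d.contains i) then d.insert i 1 else d.insert i (d.getD i 0 + 1))
      PySem.Dict.empty).values
    = (PySem.Set.ofList s).map (fun k => (s.count k : Int)) := by
  rw [pvAFold_eq_counter]
  rw [PySem.Dict.values_eq_map_keys _ (PySem.Dict.nodup_keys_counter s) 0]
  rw [PySem.Dict.keys_counter]
  apply List.map_congr_left
  intro k _
  exact PySem.Dict.getD_counter s k

theorem pvBcounts_eq (x : Char) (xs : List Char)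
    (h : (x :: xs).Pairwise (· ≤ ·)) :
    (((x :: xs).zip ((x :: xs).drop 1)).foldl
        (fun (st : List Int × Int) pc =>
          if pc.2 == pc.1 then (st.1, st.2 + 1) else (st.1 ++ [st.2], 1))
        (([] : List Int), 1)).1 ++
      [(((x :: xs).zip ((x :: xs).drop 1)).foldl
        (fun (st : List Int × Int) pc =>
          if pc.2 == pc.1 then (st.1, st.2 + 1) else (st.1 ++ [st.2], 1))
        (([] : List Int), 1)).2]
    = (PySem.Set.ofList (x :: xs)).map (fun c => ((x :: xs).count c : Int)) := by
  simp only [List.drop_succ_cons, List.drop_zero]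
  rw [pvFold_eq_go xs x [] 1, pvGo_sorted xs x 1 h, List.nil_append]
  apply List.map_congr_left
  intro c _
  by_cases hc : c = x
  · subst hc; simp [List.count_cons_self]; push_cast; ring
  · simp [hc]

theorem pvPerm (s : List Char) :
    ((PySem.Set.ofList (PySem.List.sorted s (fun c => c) false)).map
        (fun c => ((PySem.List.sorted s (fun c => c) false).count c : Int))).Perm
      ((PySem.Set.ofList s).map (fun k => (s.count k : Int))) := by
  have hp : (PySem.List.sorted s (fun c => c) false).Perm s := PySem.List.sorted_perm s _ false
  have h1 : (PySem.Set.ofList (PySem.List.sorted s (fun c => c) false)).map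
        (fun c => ((PySem.List.sorted s (fun c => c) false).count c : Int))
      = (PySem.Set.ofList (PySem.List.sorted s (fun c => c) false)).map
        (fun c => (s.count c : Int)) :=
    List.map_congr_left (fun c _ => by rw [hp.count_eq])
  rw [h1]
  refine List.Perm.map _ ?_
  apply List.perm_of_nodup_nodup_toFinset_eq (PySem.Set.nodup_ofList _) (PySem.Set.nodup_ofList _)
  ext a
  simp [PySem.Set.mem_ofList, hp.mem_iff]

-- ===== VERDICT (by name: the statement is the Claim_ definition above) =====
theorem check_spec : Claim_equal_check := by
  unfold Claim_equal_check
  intro num _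
  unfold Spec_check check check_alt
  simp only []
  rcases hs : (PySem.Int.toStr num).toList with _ | ⟨x, xs⟩
  · -- str(num) empty: both sides are false
    have hsl : PySem.List.sorted ([] : List Char) (fun c : Char => c) false = [] :=
      (PySem.List.sorted_eq_nil_iff _ _ _).2 rfl
    rw [hsl]
    simp [PySem.List.min?, PySem.List.max?, PySem.Dict.values, PySem.Dict.empty]
  · -- A side values
    rw [pvAvals_eq (x :: xs)]
    -- B side: name the sorted list and expose its head
    have hpl : (PySem.List.sorted (x :: xs) (fun c => c) false).Perm (x :: xs) :=
      PySem.List.sorted_perm _ _ false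
    rcases hsl : PySem.List.sorted (x :: xs) (fun c => c) false with _ | ⟨y, ys⟩
    · exact absurd ((PySem.List.sorted_eq_nil_iff _ _ _).1 hsl) (by simp)
    · have hpw : (y :: ys).Pairwise (· ≤ ·) := by
        have := PySem.List.sorted_pairwise (x :: xs) (fun c => c)
        rw [hsl] at this
        exact this
      rw [pvBcounts_eq y ys hpw]
      -- the two count lists are permutations of each other
      have hperm : ((PySem.Set.ofList (y :: ys)).map (fun c => ((y :: ys).count c : Int))).Perm
          ((PySem.Set.ofList (x :: xs)).map (fun k => ((x :: xs).count k : Int))) := by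
        have := pvPerm (x :: xs)
        rw [hsl] at this
        exact this
      -- both are nonempty, so min?/max? are some
      have hBne : (PySem.Set.ofList (y :: ys)).map (fun c => ((y :: ys).count c : Int)) ≠ [] := by
        rw [PySem.Set.ofList_cons]; simp
      have hAne : (PySem.Set.ofList (x :: xs)).map (fun k => ((x :: xs).count k : Int)) ≠ [] := by
        rw [PySem.Set.ofList_cons]; simp
      rcases hmnA : PySem.List.min? ((PySem.Set.ofList (x :: xs)).map (fun k => ((x :: xs).count k : Int))) (fun v => v) with _ | mnA
      · exact absurd ((PySem.List.min?_eq_none_iff _ _).1 hmnA) hAne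
      rcases hmxA : PySem.List.max? ((PySem.Set.ofList (x :: xs)).map (fun k => ((x :: xs).count k : Int))) (fun v => v) with _ | mxA
      · exact absurd ((PySem.List.max?_eq_none_iff _ _).1 hmxA) hAne
      rcases hmnB : PySem.List.min? ((PySem.Set.ofList (y :: ys)).map (fun c => ((y :: ys).count c : Int))) (fun v => v) with _ | mnB
      · exact absurd ((PySem.List.min?_eq_none_iff _ _).1 hmnB) hBne
      rcases hmxB : PySem.List.max? ((PySem.Set.ofList (y :: ys)).map (fun c => ((y :: ys).count c : Int))) (fun v => v) with _ | mxB
      · exact absurd ((PySem.List.max?_eq_none_iff _ _).1 hmxB) hBne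
      have hmn : mnB = mnA := pvMinEq hperm hmnB hmnA
      have hmx : mxB = mxA := pvMaxEq hperm hmxB hmxA
      have hlen : ((y :: ys).length : Int) = PySem.Str.len (PySem.Int.toStr num) := by
        have h1 : (y :: ys).length = (x :: xs).length := by
          have := hpl; rw [hsl] at this; exact this.length_eq
        simp [PySem.Str.len, hs, h1]
      simp only [hmnA, hmxA, hmn, hmx, hlen, Option.elim]
      split <;> simp_all
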